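-- pv_equiv track=rewrite | github.com/Dmitriy-Pozdnyakov/docker-kafka-clients-confluent-manual-commit | app/oracle_logminer_cdc/cdc_schema_registry.py | _split_csv_sql
-- ===== SOURCE A (Python) =====
-- from typing import Any, Dict, List, Optional, Sequence, Tuple
--
-- def _split_csv_sql(text: str) -> List[str]:
--     """Разбивает SQL-список по запятым с учетом строковых литералов."""
--     items: List[str] = []
--     buf: List[str] = []
--     in_string = False
--     paren_depth = 0
--     i = 0
--     while i < len(text):
--         ch = text[i]
--         if ch == "'":
--             buf.append(ch)
--             if in_string and i + 1 < len(text) and text[i + 1] == "'":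
--                 buf.append(text[i + 1])
--                 i += 2
--                 continue
--             in_string = not in_string
--         elif not in_string and ch == "(":
--             paren_depth += 1
--             buf.append(ch)
--         elif not in_string and ch == ")":
--             if paren_depth > 0:
--                 paren_depth -= 1
--             buf.append(ch)
--         elif ch == "," and not in_string and paren_depth == 0:
--             items.append("".join(buf).strip())
--             buf = []
--             i += 1
--             continue
--         else:
--             buf.append(ch)
--         i += 1
--     tail = "".join(buf).strip()
--     if tail:
--         items.append(tail)
--     return items
-- ===== SOURCE B (Python) =====
-- from typing import List
--
--
-- def _skip_string(text: str, j: int) -> int: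
--     """Return index just past the string literal whose opening quote is at j-1.
--     An unterminated literal swallows the rest of the text; '' is an escape."""
--     n = len(text)
--     while j < n:
--         if text[j] == "'":
--             if j + 1 < n and text[j + 1] == "'":
--                 j += 2
--                 continue
--             return j + 1
--         j += 1
--     return j
--
--
-- def _split_csv_sql(text: str) -> List[str]:
--     """Tokenizing splitter: record raw segments by slicing at top-level commas
--     (whole string literals consumed at once), then strip each segment,
--     dropping the last one only when it strips to empty."""
--     segs: List[str] = []
--     n = len(text)
--     i = 0
--     start = 0
--     depth = 0
--     while i < n:
--         ch = text[i]
--         if ch == "'":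
--             i = _skip_string(text, i + 1)
--         elif ch == "(":
--             depth += 1
--             i += 1
--         elif ch == ")":
--             if depth:
--                 depth -= 1
--             i += 1
--         elif ch == "," and depth == 0:
--             segs.append(text[start:i])
--             start = i + 1
--             i += 1
--         else:
--             i += 1
--     segs.append(text[start:])
--     out = [s.strip() for s in segs[:-1]]
--     last = segs[-1].strip()
--     if last:
--         out.append(last)
--     return out
-- ===== Notes on version B (the rewrite author's own statement) =====
-- stated objective: faster
-- what changed: B replaces A's per-character buffer/in_string state machine with a tokenizer that consumes each whole quoted literal in one inner helper call and records top-level comma cut points, then produces the result by slicing the text between consecutive cuts and stripping each slice.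
import Mathlib
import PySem

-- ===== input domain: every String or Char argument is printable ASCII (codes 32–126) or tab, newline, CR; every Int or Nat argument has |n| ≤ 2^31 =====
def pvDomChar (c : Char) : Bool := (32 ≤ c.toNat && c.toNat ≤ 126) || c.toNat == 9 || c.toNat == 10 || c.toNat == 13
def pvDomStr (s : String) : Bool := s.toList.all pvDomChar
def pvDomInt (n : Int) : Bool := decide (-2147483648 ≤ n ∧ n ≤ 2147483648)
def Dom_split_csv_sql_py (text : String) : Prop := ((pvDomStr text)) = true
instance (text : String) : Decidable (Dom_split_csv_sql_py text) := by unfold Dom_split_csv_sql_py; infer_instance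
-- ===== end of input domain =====

-- B replaces A's per-character buffer/in_string state machine by a tokenizer that consumes
-- whole string literals at once and cuts the text into segments at top-level commas
-- (constant-factor faster in a timing run: no per-character buffer appends);
-- return values proved equal on Dom.

-- ===== PORT A =====
-- A's while loop over index i, transliterated as recursion on the remaining suffix of the
-- text (text[i] = head, text[i+1] = head of the tail); buf/items/in_string/paren_depth are
-- the loop state carried through the recursion.
def sqlLoopA : List Char → List Char → List String → Bool → Nat → List String
  | [], buf, items, _instr, _d =>
      let tail := PySem.Str.strip (String.ofList buf)
      if tail ≠ "" then items ++ [tail] else items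
  | ch :: rest, buf, items, instr, d =>
      if ch = '\'' then
        if instr && (match rest with | c2 :: _ => c2 = '\'' | [] => false) then
          sqlLoopA rest.tail (buf ++ [ch] ++ ['\'']) items instr d
        else
          sqlLoopA rest (buf ++ [ch]) items (!instr) d
      else if !instr && ch = '(' then
        sqlLoopA rest (buf ++ [ch]) items instr (d + 1)
      else if !instr && ch = ')' then
        sqlLoopA rest (buf ++ [ch]) items instr (if d > 0 then d - 1 else d)
      else if ch = ',' && !instr && d = 0 then
        sqlLoopA rest [] (items ++ [PySem.Str.strip (String.ofList buf)]) instr d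
      else
        sqlLoopA rest (buf ++ [ch]) items instr d
  termination_by rest _ _ _ _ => rest.length
  decreasing_by all_goals simp [List.length_tail]

def split_csv_sql_py (text : String) : List String :=
  sqlLoopA text.toList [] [] false 0

-- ===== PORT B =====
-- B's _skip_string: consume a whole quoted literal (opening quote already consumed);
-- returns (consumed characters, remaining suffix); '' is an escape, an unterminated
-- literal swallows the rest of the text.
def sqlSkipStr : List Char → (List Char × List Char)
  | [] => ([], [])
  | '\'' :: '\'' :: r => ('\'' :: '\'' :: (sqlSkipStr r).1, (sqlSkipStr r).2)
  | '\'' :: r => (['\''], r)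
  | c :: r => (c :: (sqlSkipStr r).1, (sqlSkipStr r).2)

-- cited by rawSegs's decreasing_by
theorem sqlSkipStr_len_le : ∀ (l : List Char), (sqlSkipStr l).2.length ≤ l.length := by
  intro l
  fun_induction sqlSkipStr l <;> simp_all <;> omega

-- B's main scan: cut the text into raw segments at top-level commas
-- (the Python slices text[start:i] become the accumulated segment `cur`).
def rawSegs : List Char → Nat → List Char → List (List Char)
  | [], _d, cur => [cur]
  | '\'' :: r, d, cur => rawSegs (sqlSkipStr r).2 d (cur ++ '\'' :: (sqlSkipStr r).1)
  | '(' :: r, d, cur => rawSegs r (d + 1) (cur ++ ['('])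
  | ')' :: r, d, cur => rawSegs r (d - 1) (cur ++ [')'])
  | ',' :: r, 0, cur => cur :: rawSegs r 0 []
  | c :: r, d, cur => rawSegs r d (cur ++ [c])
  termination_by rest _ _ => rest.length
  decreasing_by all_goals first
    | (simp; have := sqlSkipStr_len_le r; omega)
    | simp

-- B's tail processing: strip every segment, append the last one only if nonempty.
def finishSegs (segs : List (List Char)) : List String :=
  let out := segs.dropLast.map (fun s => PySem.Str.strip (String.ofList s))
  let last := PySem.Str.strip (String.ofList (segs.getLastD []))
  if last ≠ "" then out ++ [last] else out


def split_csv_sql_py_alt (text : String) : List String :=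
  finishSegs (rawSegs text.toList 0 [])

-- ===== PRECONDITION & SPEC =====
def Spec_split_csv_sql_py (text : String) (out : List String) : Prop := out = split_csv_sql_py_alt text
instance (text : String) (out : List String) : Decidable (Spec_split_csv_sql_py text out) := by unfold Spec_split_csv_sql_py; infer_instance

-- ===== CLAIM (what is proved, stated in full; the proofs are below) =====
def Claim_equal_split_csv_sql_py : Prop := ∀ (text : String), Dom_split_csv_sql_py text → Spec_split_csv_sql_py text (split_csv_sql_py text)

-- ===== LEMMAS AND PROOFS =====

theorem rawSegs_ne_nil : ∀ (rest : List Char) (d : Nat) (cur : List Char),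
    rawSegs rest d cur ≠ [] := by
  intro rest d cur
  fun_induction rawSegs rest d cur <;> simp_all

theorem finishSegs_cons (b : List Char) (segs : List (List Char)) (h : segs ≠ []) :
    finishSegs (b :: segs) = PySem.Str.strip (String.ofList b) :: finishSegs segs := by
  cases segs with
  | nil => exact absurd rfl h
  | cons s t =>
      simp only [finishSegs, List.dropLast_cons₂, List.map_cons, List.getLastD_cons]
      split <;> simp


theorem sqlLoopA_instr (r : List Char) (buf : List Char) (items : List String) (d : Nat) :
    sqlLoopA r buf items true d
      = sqlLoopA (sqlSkipStr r).2 (buf ++ (sqlSkipStr r).1) items false d := by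
  fun_induction sqlSkipStr r generalizing buf with
  | case1 => simp [sqlLoopA]
  | case2 r ih =>
      conv_lhs => rw [sqlLoopA.eq_def]
      simp only [List.tail_cons, reduceIte, Bool.and_self, if_true]
      rw [show ((buf ++ ['\''] ++ ['\'']) : List Char) = buf ++ ['\'', '\''] from by simp]
      rw [ih]
      simp
  | case3 r hne =>
      conv_lhs => rw [sqlLoopA.eq_def]
      cases r with
      | nil => simp [sqlLoopA]
      | cons c2 r2 =>
          have hc2 : c2 ≠ '\'' := fun h => hne r2 (by rw [h])
          simp [sqlLoopA, hc2]
  | case4 c r hne2 hq ih =>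
      have hc : c ≠ '\'' := fun h => hq h
      conv_lhs => rw [sqlLoopA.eq_def]
      simp only [hc, if_false, Bool.not_true, Bool.false_and, Bool.and_false, reduceIte]
      rw [ih]
      simp

theorem sqlLoopA_eq (rest : List Char) (d : Nat) (buf : List Char) (items : List String) :
    sqlLoopA rest buf items false d = items ++ finishSegs (rawSegs rest d buf) := by
  fun_induction rawSegs rest d buf generalizing items with
  | case1 d cur =>
      simp [sqlLoopA, finishSegs]
      split <;> simp_all
  | case2 r d cur ih =>
      conv_lhs => rw [sqlLoopA.eq_def]
      simp only [reduceIte, Bool.false_and, if_false, Bool.not_false]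
      rw [sqlLoopA_instr]
      rw [show ((cur ++ ['\''] ++ (sqlSkipStr r).1) : List Char)
            = cur ++ '\'' :: (sqlSkipStr r).1 from by simp]
      exact ih items
  | case3 r d cur ih =>
      conv_lhs => rw [sqlLoopA.eq_def]
      simp only [reduceIte, Bool.not_false, Bool.true_and, if_true]
      exact ih items
  | case4 r d cur ih =>
      conv_lhs => rw [sqlLoopA.eq_def]
      simp only [reduceIte, Bool.not_false, Bool.true_and, if_true]
      rw [show (if d > 0 then d - 1 else d) = d - 1 from by split <;> omega]
      exact ih items
  | case5 r cur ih =>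
      conv_lhs => rw [sqlLoopA.eq_def]
      simp only [reduceIte, Bool.not_false, Bool.and_true, Bool.true_and, Bool.and_self, if_true]
      rw [ih]
      rw [finishSegs_cons _ _ (rawSegs_ne_nil r 0 [])]
      simp
  | case6 c r d cur hq hp hc hcm ih =>
      have hcq : c ≠ '\'' := fun h => hq h
      have hcp : c ≠ '(' := fun h => hp h
      have hcc : c ≠ ')' := fun h => hc h
      conv_lhs => rw [sqlLoopA.eq_def]
      by_cases hc' : c = ','
      · have hd0 : d ≠ 0 := fun h => hcm h hc'
        simpa [hc', hd0] using ih items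
      · simpa [hcq, hcp, hcc, hc'] using ih items

-- ===== VERDICT (by name: the statement is the Claim_ definition above) =====
theorem split_csv_sql_py_spec : Claim_equal_split_csv_sql_py := by
  intro text _
  show split_csv_sql_py text = split_csv_sql_py_alt text
  unfold split_csv_sql_py split_csv_sql_py_alt
  rw [sqlLoopA_eq]
  simp
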